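-- pv_equiv track=rewrite | github.com/avsirbu82/FRITZ-Box-20-digits-password-generator | FritzWLGenerator.py | has_five_consecutive_odd_even
-- ===== SOURCE A (Python) =====
-- def has_five_consecutive_odd_even(sequence):
--     odd_count = 0
--     even_count = 0
--
--     for char in sequence:
--         if not char.isdigit():
--             odd_count = 0
--             even_count = 0
--             continue
--
--         num = int(char)
--         if num % 2 == 0:
--             even_count += 1
--             odd_count = 0  # Reset the odd counter
--         else:
--             odd_count += 1
--             even_count = 0  # Reset the event counter
--
--         if odd_count > 13 or even_count > 13:
--             return True
--
--     return False
-- ===== SOURCE B (Python) =====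
-- from itertools import groupby, islice
--
--
-- def _classify(char):
--     if not char.isdigit():
--         return None
--     return int(char) % 2
--
--
-- def has_five_consecutive_odd_even(sequence):
--     # Group the sequence into maximal runs of same class (odd digit / even
--     # digit / non-digit) and report a digit-parity run of length >= 14.
--     for key, group in groupby(sequence, key=_classify):
--         if key is None:
--             continue
--         if len(list(islice(group, 14))) >= 14:
--             return True
--     return False
-- ===== Notes on version B (the rewrite author's own statement) =====
-- stated objective: idiomatic
-- what changed: Replaces the two mutually-resetting odd/even counters with itertools.groupby over a parity classification of each character, returning True for the first odd- or even-digit run whose length reaches 14 (counted lazily with islice).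
import Mathlib
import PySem

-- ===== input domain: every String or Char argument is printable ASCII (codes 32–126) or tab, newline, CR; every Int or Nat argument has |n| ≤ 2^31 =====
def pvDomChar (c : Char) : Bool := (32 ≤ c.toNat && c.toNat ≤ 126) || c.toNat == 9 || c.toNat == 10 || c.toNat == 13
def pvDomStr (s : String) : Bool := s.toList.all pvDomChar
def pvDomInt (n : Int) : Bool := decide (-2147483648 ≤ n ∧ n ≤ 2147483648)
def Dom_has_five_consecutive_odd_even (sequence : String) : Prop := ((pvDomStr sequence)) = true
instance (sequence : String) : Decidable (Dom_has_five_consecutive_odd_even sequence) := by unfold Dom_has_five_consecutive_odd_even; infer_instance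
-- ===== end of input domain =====

-- B replaces A's two mutually-resetting odd/even counters with a groupby-style scan over
-- maximal same-parity runs (objective: idiomatic); same return value on every string.

-- ===== PORT A =====
-- A's loop: state (odd_count, even_count), reset on non-digits, early return at > 13.
def pvLoopA : List Char → Nat → Nat → Bool
  | [], _, _ => false
  | c :: rest, odd_count, even_count =>
    if ! PySem.Chars.isdigit c then
      pvLoopA rest 0 0
    else
      -- num = int(char): for an ASCII digit char this is its code minus 48 (exact on Dom)
      let num : Int := (c.toNat : Int) - 48
      if PySem.Int.mod num 2 = 0 then
        let even' := even_count + 1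
        if 0 > 13 ∨ even' > 13 then true else pvLoopA rest 0 even'
      else
        let odd' := odd_count + 1
        if odd' > 13 ∨ 0 > 13 then true else pvLoopA rest odd' 0

def has_five_consecutive_odd_even (sequence : String) : Bool :=
  pvLoopA sequence.toList 0 0

-- ===== PORT B =====
-- _classify: None for a non-digit, else int(char) % 2
def pvClassify (c : Char) : Option Int :=
  if PySem.Chars.isdigit c then some (PySem.Int.mod ((c.toNat : Int) - 48) 2) else none

-- lazy count of the current parity group, capped at 14 (islice(group, 14));
-- returns (reached 14?, unconsumed suffix)
def pvRun (p : Int) (n : Nat) : List Char → Bool × List Char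
  | [] => if n ≥ 14 then (true, []) else (false, [])
  | c :: rest =>
    if n ≥ 14 then (true, c :: rest)
    else if pvClassify c = some p then pvRun p (n + 1) rest
    else (false, c :: rest)

theorem pvRun_snd_length (p : Int) (n : Nat) (l : List Char) : (pvRun p n l).2.length ≤ l.length := by
  induction l generalizing n with
  | nil => simp only [pvRun]; split <;> simp
  | cons c rest ih =>
    simp only [pvRun]
    split_ifs <;> simp
    exact le_trans (ih (n + 1)) (Nat.le_succ _)

-- the groupby loop: skip a non-digit group, or count a parity group lazily
def pvLoopB : List Char → Bool
  | [] => false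
  | c :: rest =>
    match pvClassify c with
    | none => pvLoopB (rest.dropWhile (fun d => pvClassify d == none))
    | some p =>
      match h : pvRun p 1 rest with
      | (true, _) => true
      | (false, rem) => pvLoopB rem
  termination_by l => l.length
  decreasing_by
  · exact Nat.lt_succ_of_le (List.length_dropWhile_le _ _)
  · exact Nat.lt_succ_of_le (le_trans (le_of_eq (congrArg List.length (congrArg Prod.snd h.symm))) (pvRun_snd_length p 1 rest))

def has_five_consecutive_odd_even_alt (sequence : String) : Bool :=
  pvLoopB sequence.toList

-- ===== PRECONDITION & SPEC =====
def Spec_has_five_consecutive_odd_even (sequence : String) (out : Bool) : Prop := out = has_five_consecutive_odd_even_alt sequence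
instance (sequence : String) (out : Bool) : Decidable (Spec_has_five_consecutive_odd_even sequence out) := by unfold Spec_has_five_consecutive_odd_even; infer_instance

-- ===== CLAIM (what is proved, stated in full; the proofs are below) =====
def Claim_equal_has_five_consecutive_odd_even : Prop := ∀ (sequence : String), Dom_has_five_consecutive_odd_even sequence → Spec_has_five_consecutive_odd_even sequence (has_five_consecutive_odd_even sequence)

-- ===== LEMMAS AND PROOFS =====

-- A's state when exactly one counter is live: parity p with count n
def pvStateA (p : Int) (n : Nat) (l : List Char) : Bool :=
  if p = 0 then pvLoopA l 0 n else pvLoopA l n 0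

-- B's continuation after entering a parity group
def pvRunCont (p : Int) (n : Nat) (l : List Char) : Bool :=
  match pvRun p n l with
  | (true, _) => true
  | (false, rem) => pvLoopB rem

-- step lemmas for A (keep PySem.Int.mod opaque)
theorem pvLoopA_nondigit (c : Char) (rest : List Char) (o e : Nat)
    (hd : PySem.Chars.isdigit c = false) : pvLoopA (c :: rest) o e = pvLoopA rest 0 0 := by
  simp only [pvLoopA, hd, Bool.not_false, if_true]

theorem pvLoopA_even (c : Char) (rest : List Char) (o e : Nat)
    (hd : PySem.Chars.isdigit c = true)
    (hm : PySem.Int.mod ((c.toNat : Int) - 48) 2 = 0) :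
    pvLoopA (c :: rest) o e = if e + 1 > 13 then true else pvLoopA rest 0 (e + 1) := by
  simp only [pvLoopA, hd, Bool.not_true, Bool.false_eq_true, if_false, hm, if_pos rfl]
  split_ifs with h1 h2 h2 <;> first | rfl | omega

theorem pvLoopA_odd (c : Char) (rest : List Char) (o e : Nat)
    (hd : PySem.Chars.isdigit c = true)
    (hm : PySem.Int.mod ((c.toNat : Int) - 48) 2 ≠ 0) :
    pvLoopA (c :: rest) o e = if o + 1 > 13 then true else pvLoopA rest (o + 1) 0 := by
  simp only [pvLoopA, hd, Bool.not_true, Bool.false_eq_true, if_false, if_neg hm]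
  split_ifs with h1 h2 h2 <;> first | rfl | omega

theorem pvClassify_digit (c : Char) (hd : PySem.Chars.isdigit c = true) :
    pvClassify c = some (PySem.Int.mod ((c.toNat : Int) - 48) 2) := by
  simp only [pvClassify, hd, if_pos rfl, if_true]

theorem pvClassify_nondigit (c : Char) (hd : PySem.Chars.isdigit c = false) :
    pvClassify c = none := by
  simp only [pvClassify, hd, Bool.false_eq_true, if_false]

-- pvStateA in branch form
theorem pvStateA_zero (n : Nat) (l : List Char) : pvStateA 0 n l = pvLoopA l 0 n := if_pos rfl

theorem pvStateA_one (n : Nat) (l : List Char) : pvStateA 1 n l = pvLoopA l n 0 :=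
  if_neg (by norm_num)

-- pvStateA step form, by cases on whether the next parity equals the live one
theorem pvStateA_step (c : Char) (rest : List Char) (p : Int) (n : Nat)
    (hd : PySem.Chars.isdigit c = true) (hp01 : p = 0 ∨ p = 1) :
    pvStateA p n (c :: rest) =
      if PySem.Int.mod ((c.toNat : Int) - 48) 2 = p then
        (if n + 1 > 13 then true else pvStateA p (n + 1) rest)
      else
        pvStateA (PySem.Int.mod ((c.toNat : Int) - 48) 2) 1 rest := by
  have h0 : (0 : Int) ≤ PySem.Int.mod ((c.toNat : Int) - 48) 2 :=
    PySem.Int.mod_nonneg _ (by norm_num)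
  have h2 : PySem.Int.mod ((c.toNat : Int) - 48) 2 < 2 :=
    PySem.Int.mod_lt _ (by norm_num)
  rcases (by omega :
      PySem.Int.mod ((c.toNat : Int) - 48) 2 = 0 ∨ PySem.Int.mod ((c.toNat : Int) - 48) 2 = 1)
    with hm | hm <;> rcases hp01 with hp | hp <;> subst hp
  · rw [hm, if_pos rfl]
    simp only [pvStateA_zero, pvLoopA_even c rest 0 n hd hm]
  · rw [hm, if_neg (by norm_num : ¬ (0 : Int) = 1)]
    simp only [pvStateA_one, pvStateA_zero, pvLoopA_even c rest n 0 hd hm,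
      if_neg (show ¬ 0 + 1 > 13 by omega)]
  · rw [hm, if_neg (by norm_num : ¬ (1 : Int) = 0)]
    simp only [pvStateA_zero, pvStateA_one,
      pvLoopA_odd c rest 0 n hd (by rw [hm]; norm_num),
      if_neg (show ¬ 0 + 1 > 13 by omega)]
  · rw [hm, if_pos rfl]
    simp only [pvStateA_one, pvLoopA_odd c rest n 0 hd (by rw [hm]; norm_num)]

-- unchanged A-result over a skipped non-digit prefix
theorem pvLoopA_dropWhile (l : List Char) :
    pvLoopA (l.dropWhile (fun d => pvClassify d == none)) 0 0 = pvLoopA l 0 0 := by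
  induction l with
  | nil => rfl
  | cons c rest ih =>
    rw [List.dropWhile_cons]
    by_cases h : PySem.Chars.isdigit c
    · rw [if_neg (by simp [pvClassify_digit c h])]
    · rw [if_pos (by simp [pvClassify_nondigit c (by simpa using h)]), ih,
        pvLoopA_nondigit c rest 0 0 (by simpa using h)]

theorem pvRun_of_ge (p : Int) (n : Nat) (l : List Char) (h : n ≥ 14) : pvRun p n l = (true, l) := by
  cases l <;> simp [pvRun, h]

theorem pvLoopB_cons_some (c : Char) (rest : List Char) (p : Int)
    (hcls : pvClassify c = some p) : pvLoopB (c :: rest) = pvRunCont p 1 rest := by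
  rw [pvLoopB, hcls]
  simp only [pvRunCont]
  rcases hr : pvRun p 1 rest with ⟨b, rem⟩
  cases b <;> simp

theorem pvRunCont_lt (p : Int) (n : Nat) (c : Char) (rest : List Char) (h14 : n < 14) :
    pvRunCont p n (c :: rest) =
      if pvClassify c = some p then pvRunCont p (n + 1) rest else pvLoopB (c :: rest) := by
  simp only [pvRunCont, pvRun, Nat.not_le.mpr h14, if_false]
  split_ifs with h
  · rfl
  · rfl

theorem pvMain : ∀ (N : Nat) (l : List Char), l.length ≤ N →
    (pvLoopA l 0 0 = pvLoopB l) ∧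
    (∀ (p : Int) (n : Nat), p = 0 ∨ p = 1 → 1 ≤ n → n < 14 → pvStateA p n l = pvRunCont p n l) := by
  intro N
  induction N with
  | zero =>
    intro l hl
    have hnil : l = [] := List.eq_nil_of_length_eq_zero (Nat.le_zero.mp hl)
    subst hnil
    refine ⟨by simp [pvLoopA, pvLoopB], ?_⟩
    intro p n hp01 h1 h14
    simp only [pvStateA, pvRunCont, pvRun, Nat.not_le.mpr h14, if_false]
    split_ifs <;> simp [pvLoopA, pvLoopB]
  | succ N ih =>
    intro l hl
    cases l with
    | nil =>
      refine ⟨by simp [pvLoopA, pvLoopB], ?_⟩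
      intro p n hp01 h1 h14
      simp only [pvStateA, pvRunCont, pvRun, Nat.not_le.mpr h14, if_false]
      split_ifs <;> simp [pvLoopA, pvLoopB]
    | cons c rest =>
      have hrest : rest.length ≤ N := Nat.le_of_succ_le_succ hl
      by_cases hd : PySem.Chars.isdigit c
      · have hcls := pvClassify_digit c hd
        have hq01 : PySem.Int.mod ((c.toNat : Int) - 48) 2 = 0 ∨
            PySem.Int.mod ((c.toNat : Int) - 48) 2 = 1 := by
          have h0 : (0 : Int) ≤ PySem.Int.mod ((c.toNat : Int) - 48) 2 :=
            PySem.Int.mod_nonneg _ (by norm_num)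
          have h2 : PySem.Int.mod ((c.toNat : Int) - 48) 2 < 2 :=
            PySem.Int.mod_lt _ (by norm_num)
          omega
        constructor
        · rw [pvLoopB_cons_some c rest _ hcls, ← (ih rest hrest).2 _ 1 hq01 (le_refl 1) (by omega)]
          by_cases hq : PySem.Int.mod ((c.toNat : Int) - 48) 2 = 0
          · rw [pvLoopA_even c rest 0 0 hd hq, if_neg (show ¬ 0 + 1 > 13 by omega), hq,
              pvStateA_zero]
          · have hq1 := hq01.resolve_left hq
            rw [pvLoopA_odd c rest 0 0 hd hq, if_neg (show ¬ 0 + 1 > 13 by omega), hq1,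
              pvStateA_one]
        · intro p n hp01 h1 h14
          rw [pvStateA_step c rest p n hd hp01, pvRunCont_lt p n c rest h14, hcls]
          simp only [Option.some.injEq]
          by_cases hpq : PySem.Int.mod ((c.toNat : Int) - 48) 2 = p
          · rw [if_pos hpq, if_pos hpq]
            by_cases hlim : n + 1 > 13
            · rw [if_pos hlim]
              simp [pvRunCont, pvRun_of_ge p (n + 1) rest (by omega)]
            · rw [if_neg hlim, (ih rest hrest).2 p (n + 1) hp01 (by omega) (by omega)]
          · rw [if_neg hpq, if_neg hpq, pvLoopB_cons_some c rest _ hcls,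
              (ih rest hrest).2 _ 1 hq01 (le_refl 1) (by omega)]
      · have hd' : PySem.Chars.isdigit c = false := by simpa using hd
        have hcls := pvClassify_nondigit c hd'
        have hdw : (rest.dropWhile (fun d => pvClassify d == none)).length ≤ N :=
          le_trans (List.length_dropWhile_le _ _) hrest
        constructor
        · rw [pvLoopB, hcls]
          rw [← (ih _ hdw).1, pvLoopA_dropWhile, pvLoopA_nondigit c rest 0 0 hd']
        · intro p n hp01 h1 h14
          have hstep : pvStateA p n (c :: rest) = pvLoopA rest 0 0 := by
            by_cases hp0 : p = 0 <;>
              simp [pvStateA, hp0, pvLoopA_nondigit c rest _ _ hd']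
          rw [hstep, pvRunCont_lt p n c rest h14, if_neg (by simp [hcls]), pvLoopB, hcls,
            ← (ih _ hdw).1, pvLoopA_dropWhile]

-- ===== VERDICT (by name: the statement is the Claim_ definition above) =====
theorem has_five_consecutive_odd_even_spec : Claim_equal_has_five_consecutive_odd_even := by
  intro sequence _
  unfold Spec_has_five_consecutive_odd_even has_five_consecutive_odd_even has_five_consecutive_odd_even_alt
  exact (pvMain sequence.toList.length sequence.toList (le_refl _)).1
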